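-- pv_equiv track=rewrite | github.com/kautik25/DjangoProject.github.io | app/functions.py | magic_number_finder
-- ===== SOURCE A (Python) =====
-- def magic_number_finder(list):
--   '''
--     Returns the list of magic numbers calculated by equation
--
--     Parameter:
--       list = list having open and close number of columns
--   '''
--   if len(list) != 0:
--     j = 1
--     magic_number = []
--     magic_number_part_1 = 0
--     magic_number_part_2 = 0
--     for i in list:
--       if j <= 3:
--         magic_number_part_1 += i
--       else:
--         magic_number_part_2 += i
--       if j == 6:
--         magic_number.append(int(str(magic_number_part_1 % 10) + str(magic_number_part_2 % 10)))
--         magic_number_part_1 = 0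
--         magic_number_part_2 = 0
--         j = 0
--       j += 1
--     return magic_number
--   return False
-- ===== SOURCE B (Python) =====
-- def magic_number_finder(list):
--   if len(list) == 0:
--     return False
--   groups = len(list) // 6
--   magic_number = []
--   for i in range(groups):
--     chunk = list[6*i:6*i+6]
--     magic_number.append(int(str(sum(chunk[:3]) % 10) + str(sum(chunk[3:6]) % 10)))
--   return magic_number
-- ===== Notes on version B (the rewrite author's own statement) =====
-- stated objective: simpler
-- what changed: Replaced the stateful counter loop (j/part1/part2 accumulators reset in place) by direct chunk indexing: len//6 complete groups, slice each 6-element chunk and sum its halves, keeping the string-concatenation formula verbatim. Pre_ excludes only the empty list, where both return the bool False (outside the list-of-ints return type).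
-- outside the precondition, e.g. on magic_number_finder([]): A returns False, B returns False
import Mathlib
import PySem

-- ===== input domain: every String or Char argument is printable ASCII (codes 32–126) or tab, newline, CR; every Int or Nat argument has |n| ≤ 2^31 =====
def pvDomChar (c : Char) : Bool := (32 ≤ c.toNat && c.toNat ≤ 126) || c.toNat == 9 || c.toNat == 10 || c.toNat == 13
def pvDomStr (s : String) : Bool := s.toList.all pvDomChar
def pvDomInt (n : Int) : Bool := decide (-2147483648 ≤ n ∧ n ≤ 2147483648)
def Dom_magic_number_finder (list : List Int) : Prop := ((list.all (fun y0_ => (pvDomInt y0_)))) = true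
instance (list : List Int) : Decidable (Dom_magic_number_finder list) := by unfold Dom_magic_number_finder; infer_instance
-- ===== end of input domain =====

-- B replaces A's stateful counter loop by direct slicing of the len//6 complete 6-element
-- chunks (objective: simpler); the magic-number formula itself is kept verbatim.
-- Python's False return (empty input) is ported as `none`.

-- ===== PORT A =====
-- shared expression of both Pythons: int(str(p1 % 10) + str(p2 % 10)).
-- getD 0 is exact here: the concatenation of two digit strings always parses, so ofStr? is never none.
def magicVal (p1 p2 : Int) : Int :=
  (PySem.Int.ofStr? (PySem.Int.toStr (PySem.Int.mod p1 10) ++ PySem.Int.toStr (PySem.Int.mod p2 10))).getD 0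

def aLoop : List Int → Int → Int → Int → List Int → List Int
  | [], _, _, _, acc => acc
  | i :: rest, j, p1, p2, acc =>
    let p1' := if j ≤ 3 then p1 + i else p1
    let p2' := if j ≤ 3 then p2 else p2 + i
    if j = 6 then aLoop rest (0 + 1) 0 0 (acc ++ [magicVal p1' p2'])
    else aLoop rest (j + 1) p1' p2' acc

def magic_number_finder (list : List Int) : Option (List Int) :=
  if list.length ≠ 0 then some (aLoop list 1 0 0 []) else none

-- ===== PORT B =====
def magic_number_finder_alt (list : List Int) : Option (List Int) :=
  if list.length = 0 then none
  else
    some ((List.range (list.length / 6)).map (fun i =>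
      let chunk := PySem.List.slice list (some ((6 * i : Nat) : Int)) (some ((6 * i + 6 : Nat) : Int))
      magicVal ((PySem.List.slice chunk none (some 3)).sum)
               ((PySem.List.slice chunk (some 3) (some 6)).sum)))

-- ===== PRECONDITION & SPEC =====
-- Pre_ excludes only the empty list, on which A (and B) return the bool False instead of a list of ints,
-- a value outside the declared return type Optional[list[int]] (ported as `none`, which the claim cannot cover).
def Pre_magic_number_finder (list : List Int) : Prop := list ≠ []
instance (list : List Int) : Decidable (Pre_magic_number_finder list) := by unfold Pre_magic_number_finder; infer_instance
def pvWitness_magic_number_finder : List Int := [1, 2, 3, 4, 5, 6, 7]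

def Spec_magic_number_finder (list : List Int) (out : Option (List Int)) : Prop := out = magic_number_finder_alt list
instance (list : List Int) (out : Option (List Int)) : Decidable (Spec_magic_number_finder list out) := by unfold Spec_magic_number_finder; infer_instance

-- ===== CLAIM (what is proved, stated in full; the proofs are below) =====
def Claim_equal_magic_number_finder : Prop := ∀ (list : List Int), Dom_magic_number_finder list → Pre_magic_number_finder list → Spec_magic_number_finder list (magic_number_finder list)

-- ===== LEMMAS AND PROOFS =====

-- common characterisation: the magic numbers of the complete 6-chunks, in order
def chunkMagic : List Int → List Int
  | a :: b :: c :: d :: e :: f :: rest => magicVal (a + b + c) (d + e + f) :: chunkMagic rest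
  | _ => []

theorem aLoop_eq (l : List Int) (acc : List Int) :
    aLoop l 1 0 0 acc = acc ++ chunkMagic l := by
  match l with
  | a :: b :: c :: d :: e :: f :: rest =>
    have ih := aLoop_eq rest (acc ++ [magicVal (a + b + c) (d + e + f)])
    simp only [aLoop, chunkMagic]
    norm_num
    rw [ih]
    simp [add_assoc]
  | [] => simp [aLoop, chunkMagic]
  | [a] => simp [aLoop, chunkMagic]
  | [a, b] => simp [aLoop, chunkMagic]
  | [a, b, c] => simp [aLoop, chunkMagic]
  | [a, b, c, d] => simp [aLoop, chunkMagic]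
  | [a, b, c, d, e] => simp [aLoop, chunkMagic]
termination_by l.length

theorem bMap_eq (l : List Int) :
    (List.range (l.length / 6)).map (fun i =>
      let chunk := PySem.List.slice l (some ((6 * i : Nat) : Int)) (some ((6 * i + 6 : Nat) : Int))
      magicVal ((PySem.List.slice chunk none (some 3)).sum)
               ((PySem.List.slice chunk (some 3) (some 6)).sum)) = chunkMagic l := by
  match l with
  | a :: b :: c :: d :: e :: f :: rest =>
    have ih := bMap_eq rest
    have hlen : (a :: b :: c :: d :: e :: f :: rest).length / 6 = rest.length / 6 + 1 := by
      simp only [List.length_cons]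
      omega
    rw [hlen, List.range_succ_eq_map, List.map_cons, List.map_map]
    simp only [chunkMagic]
    refine List.cons_eq_cons.mpr ⟨?_, ?_⟩
    · -- head: chunk 0 is [a,b,c,d,e,f]
      have h0 : PySem.List.slice (a::b::c::d::e::f::rest) (some ((6*0 : Nat) : Int)) (some ((6*0+6 : Nat) : Int)) = [a,b,c,d,e,f] := by
        rw [PySem.List.slice_natCast]; rfl
      simp only [h0]
      rw [PySem.List.slice_to _ (by norm_num), PySem.List.slice_toNat _ (by norm_num) (by norm_num)]
      show magicVal ([a,b,c]).sum ([d,e,f]).sum = _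
      congr 1 <;> simp <;> ring
    · -- tail: chunk (i+1) of l is chunk i of rest
      rw [← ih]
      apply List.map_congr_left
      intro i _
      simp only [Function.comp, Nat.succ_eq_add_one]
      have hchunk : PySem.List.slice (a::b::c::d::e::f::rest) (some ((6*(i+1) : Nat) : Int)) (some ((6*(i+1)+6 : Nat) : Int))
          = PySem.List.slice rest (some ((6*i : Nat) : Int)) (some ((6*i+6 : Nat) : Int)) := by
        rw [PySem.List.slice_natCast, PySem.List.slice_natCast]
        have hdrop : (a::b::c::d::e::f::rest).drop (6*(i+1)) = rest.drop (6*i) := by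
          rw [show 6*(i+1) = 6*i+1+1+1+1+1+1 from by omega]
          simp [List.drop_succ_cons]
        rw [hdrop, show 6*(i+1)+6 - 6*(i+1) = 6*i+6 - 6*i from by omega]
      simp only [hchunk]
  | [] => simp; rfl
  | [a] => simp; rfl
  | [a, b] => simp; rfl
  | [a, b, c] => simp; rfl
  | [a, b, c, d] => simp; rfl
  | [a, b, c, d, e] => simp; rfl
termination_by l.length

-- ===== VERDICT (by name: the statement is the Claim_ definition above) =====
theorem magic_number_finder_spec : Claim_equal_magic_number_finder := by
  intro l _ hpre
  unfold Spec_magic_number_finder magic_number_finder magic_number_finder_alt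
  have h : ¬ l.length = 0 := fun h0 => hpre (List.eq_nil_of_length_eq_zero h0)
  simp only [h, ne_eq, not_false_eq_true, if_true]
  rw [aLoop_eq, bMap_eq]
  simp
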